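-- pv_equiv track=rewrite | github.com/AI4Bharat/IndicNLP-Transliteration | tools/visualization/confusionmatrix_plotter.py | find_best_reference
-- ===== SOURCE A (Python) =====
-- def find_best_reference(pred_list, truth_list):
--     def LCS_length(s1, s2):
--         m = len(s1)
--         n = len(s2)
--         # An (m+1) times (n+1) matrix
--         C = [[0] * (n+1) for i in range(m+1)]
--         for i in range(1, m+1):
--             for j in range(1, n+1):
--                 if s1[i-1] == s2[j-1]:
--                     C[i][j] = C[i-1][j-1] + 1
--                 else:
--                     C[i][j] = max(C[i][j-1], C[i-1][j])
--         return C[m][n]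
--
--     best_ref = truth_list[0]
--     best_cand = pred_list[0]
--     best_ref_lcs = LCS_length(pred_list[0], truth_list[0])
--     for cand in pred_list[1:]:
--         for ref in truth_list[1:]:
--             lcs = LCS_length(cand, ref)
--             if (len(ref) - 2*lcs) < (len(best_ref) - 2*best_ref_lcs):
--                 best_ref = ref
--                 best_cand = cand
--                 best_ref_lcs = lcs
--
--     return best_cand, best_ref
-- ===== SOURCE B (Python) =====
-- def find_best_reference(pred_list, truth_list):
--     def lcs_len(s1, s2):
--         memo = {}
--
--         def lcs(i, j):
--             cached = memo.get((i, j))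
--             if cached is not None:
--                 return cached
--             if i == 0 or j == 0:
--                 v = 0
--             elif s1[i - 1] == s2[j - 1]:
--                 v = lcs(i - 1, j - 1) + 1
--             else:
--                 v = max(lcs(i - 1, j), lcs(i, j - 1))
--             memo[(i, j)] = v
--             return v
--
--         return lcs(len(s1), len(s2))
--
--     pairs = [(pred_list[0], truth_list[0])] + \
--         [(c, r) for c in pred_list[1:] for r in truth_list[1:]]
--     return min(pairs, key=lambda p: len(p[1]) - 2 * lcs_len(p[0], p[1]))
-- ===== Notes on version B (the rewrite author's own statement) =====
-- stated objective: alternative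
-- what changed: A's bottom-up (m+1)x(n+1) LCS matrix fill is replaced by a top-down memoized recursion lcs(i,j) cached in a dict, and A's nested best-pair loops with a mutable (best_cand,best_ref,best_lcs) accumulator are replaced by min() with a key over the explicitly flattened candidate/reference pair list.
import Mathlib
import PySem

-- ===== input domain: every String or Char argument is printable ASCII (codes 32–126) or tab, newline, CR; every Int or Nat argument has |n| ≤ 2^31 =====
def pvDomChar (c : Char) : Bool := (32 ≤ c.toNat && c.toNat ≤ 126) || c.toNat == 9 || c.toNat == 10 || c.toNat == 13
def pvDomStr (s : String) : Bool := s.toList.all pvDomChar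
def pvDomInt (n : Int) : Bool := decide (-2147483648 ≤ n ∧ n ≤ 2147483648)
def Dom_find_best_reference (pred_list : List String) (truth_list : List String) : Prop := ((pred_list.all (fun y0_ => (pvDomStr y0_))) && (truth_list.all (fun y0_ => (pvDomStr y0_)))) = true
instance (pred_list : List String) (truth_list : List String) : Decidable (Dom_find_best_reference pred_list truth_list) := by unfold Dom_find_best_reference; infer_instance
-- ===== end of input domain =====

-- B replaces A's bottom-up (m+1)x(n+1) LCS matrix fill by a top-down memoized recursion
-- lcs(i,j) cached in a dict, and A's nested best-pair loops with a (cand, ref, lcs)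
-- accumulator by min() with a key over the flattened pair list; same return value on every
-- input where A returns (alternative, not faster).

-- ===== PORT A =====
-- A's nested helper LCS_length: bottom-up (m+1)x(n+1) table fill.
-- All getD indices are in range on every input (i ≤ m, j ≤ n), so the defaults are never used.
def lcsA (s1 s2 : List Char) : Int :=
  let m := s1.length
  let n := s2.length
  let C0 : List (List Int) := List.replicate (m + 1) (List.replicate (n + 1) (0 : Int))
  let C := List.foldl (fun C i =>
      List.foldl (fun C j =>
        let v : Int :=
          if s1.getD (i - 1) ' ' == s2.getD (j - 1) ' ' then
            (C.getD (i - 1) []).getD (j - 1) 0 + 1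
          else
            max ((C.getD i []).getD (j - 1) 0) ((C.getD (i - 1) []).getD j 0)
        C.set i ((C.getD i []).set j v))
        C (List.range' 1 n))
    C0 (List.range' 1 m)
  (C.getD m []).getD n 0

def find_best_reference (pred_list : List String) (truth_list : List String) : String × String :=
  let best_ref := PySem.List.pyGetD truth_list 0 ""
  let best_cand := PySem.List.pyGetD pred_list 0 ""
  let best_lcs := lcsA best_cand.toList best_ref.toList
  let st := List.foldl (fun st cand =>
      List.foldl (fun st ref =>
        let l := lcsA cand.toList ref.toList
        if PySem.Str.len ref - 2 * l < PySem.Str.len st.2.1 - 2 * st.2.2 then (cand, ref, l) else st)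
        st (PySem.List.slice truth_list (some 1)))
    (best_cand, best_ref, best_lcs) (PySem.List.slice pred_list (some 1))
  (st.1, st.2.1)

-- ===== PORT B =====
-- B's inner lcs(i, j): top-down memoized recursion; the memo dict is threaded through the
-- calls. The reachable indices i, j are the nonnegative prefix lengths (0 ≤ i ≤ len(s1),
-- 0 ≤ j ≤ len(s2)), so the dict keys are Nat × Nat and s1[i-1]/s2[j-1] are the in-range getD.
def lcsM (s1 s2 : List Char) (i j : Nat) (memo : PySem.Dict (Nat × Nat) Int) :
    Int × PySem.Dict (Nat × Nat) Int :=
  match memo.get? (i, j) with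
  | some v => (v, memo)
  | none =>
    if h : i = 0 ∨ j = 0 then (0, memo.insert (i, j) 0)
    else if s1.getD (i - 1) ' ' == s2.getD (j - 1) ' ' then
      let r := lcsM s1 s2 (i - 1) (j - 1) memo
      (r.1 + 1, r.2.insert (i, j) (r.1 + 1))
    else
      let r1 := lcsM s1 s2 (i - 1) j memo
      let r2 := lcsM s1 s2 i (j - 1) r1.2
      (max r1.1 r2.1, r2.2.insert (i, j) (max r1.1 r2.1))
termination_by i + j
decreasing_by all_goals omega

-- B's lcs_len: start with an empty memo and evaluate at (len(s1), len(s2)).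
def lcsB (s1 s2 : List Char) : Int :=
  (lcsM s1 s2 s1.length s2.length PySem.Dict.empty).1

def find_best_reference_alt (pred_list : List String) (truth_list : List String) : String × String :=
  let pairs := (PySem.List.pyGetD pred_list 0 "", PySem.List.pyGetD truth_list 0 "") ::
      (PySem.List.slice pred_list (some 1)).flatMap
        (fun c => (PySem.List.slice truth_list (some 1)).map (fun r => (c, r)))
  (PySem.List.min? pairs
    (fun p => PySem.Str.len p.2 - 2 * lcsB p.1.toList p.2.toList)).getD ("", "")

-- ===== PRECONDITION & SPEC =====
-- Pre_ excludes exactly the inputs where A raises IndexError (pred_list[0] / truth_list[0] on an empty list).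
def Pre_find_best_reference (pred_list : List String) (truth_list : List String) : Prop :=
  pred_list ≠ [] ∧ truth_list ≠ []
instance (pred_list : List String) (truth_list : List String) : Decidable (Pre_find_best_reference pred_list truth_list) := by unfold Pre_find_best_reference; infer_instance
def pvWitness_find_best_reference : List String × List String := (["ab", "cd"], ["b", "xd"])

def Spec_find_best_reference (pred_list : List String) (truth_list : List String) (out : String × String) : Prop := out = find_best_reference_alt pred_list truth_list
instance (pred_list : List String) (truth_list : List String) (out : String × String) : Decidable (Spec_find_best_reference pred_list truth_list out) := by unfold Spec_find_best_reference; infer_instance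

-- ===== CLAIM (what is proved, stated in full; the proofs are below) =====
def Claim_equal_find_best_reference : Prop := ∀ (pred_list : List String) (truth_list : List String), Dom_find_best_reference pred_list truth_list → Pre_find_best_reference pred_list truth_list → Spec_find_best_reference pred_list truth_list (find_best_reference pred_list truth_list)

-- ===== LEMMAS AND PROOFS =====

-- The pure LCS-prefix recurrence both programs compute: L i j = LCS(s1[:i], s2[:j]).
def Lrec (s1 s2 : List Char) (i j : Nat) : Int :=
  if h : i = 0 ∨ j = 0 then 0
  else if s1.getD (i - 1) ' ' == s2.getD (j - 1) ' ' then
    Lrec s1 s2 (i - 1) (j - 1) + 1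
  else
    max (Lrec s1 s2 (i - 1) j) (Lrec s1 s2 i (j - 1))
termination_by i + j
decreasing_by all_goals omega

theorem Lrec_zero (s t : List Char) (i j : Nat) (h : i = 0 ∨ j = 0) : Lrec s t i j = 0 := by
  rw [Lrec]
  exact dif_pos h

theorem Lrec_succ (s t : List Char) (i j : Nat) (h : ¬(i = 0 ∨ j = 0)) :
    Lrec s t i j = if s.getD (i - 1) ' ' == t.getD (j - 1) ' ' then Lrec s t (i - 1) (j - 1) + 1
      else max (Lrec s t (i - 1) j) (Lrec s t i (j - 1)) := by
  conv_lhs => rw [Lrec]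
  rw [dif_neg h]

-- ----- B side: the memoized recursion computes Lrec -----

def GoodM (s1 s2 : List Char) (memo : PySem.Dict (Nat × Nat) Int) : Prop :=
  ∀ i j v, memo.get? (i, j) = some v → v = Lrec s1 s2 i j

theorem goodM_insert (s1 s2 : List Char) (memo : PySem.Dict (Nat × Nat) Int)
    (h : GoodM s1 s2 memo) (i j : Nat) (v : Int) (hv : v = Lrec s1 s2 i j) :
    GoodM s1 s2 (memo.insert (i, j) v) := by
  intro i' j' w hw
  rw [PySem.Dict.get?_insert] at hw
  split_ifs at hw with he
  · rw [Prod.mk.injEq] at he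
    obtain ⟨rfl, rfl⟩ := he
    rw [← Option.some.inj hw]
    exact hv
  · exact h i' j' w hw

theorem lcsM_correct (s1 s2 : List Char) :
    ∀ (n i j : Nat) (memo : PySem.Dict (Nat × Nat) Int), i + j ≤ n → GoodM s1 s2 memo →
      (lcsM s1 s2 i j memo).1 = Lrec s1 s2 i j ∧ GoodM s1 s2 (lcsM s1 s2 i j memo).2 := by
  intro n
  induction n with
  | zero =>
    intro i j memo hn hg
    obtain ⟨rfl, rfl⟩ : i = 0 ∧ j = 0 := by omega
    have hL : Lrec s1 s2 0 0 = 0 := by rw [Lrec]; simp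
    rw [lcsM]
    cases hmem : memo.get? ((0 : Nat), (0 : Nat)) with
    | some v =>
      simp only
      exact ⟨hg 0 0 v hmem, hg⟩
    | none =>
      rw [dif_pos (Or.inl rfl)]
      exact ⟨hL.symm, goodM_insert s1 s2 memo hg 0 0 0 hL.symm⟩
  | succ n ih =>
    intro i j memo hn hg
    rw [lcsM]
    cases hmem : memo.get? (i, j) with
    | some v =>
      simp only
      exact ⟨hg i j v hmem, hg⟩
    | none =>
      by_cases h0 : i = 0 ∨ j = 0
      · have hL : Lrec s1 s2 i j = 0 := by rw [Lrec]; rw [dif_pos h0]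
        rw [dif_pos h0]
        exact ⟨hL.symm, goodM_insert s1 s2 memo hg i j 0 hL.symm⟩
      · rw [dif_neg h0]
        by_cases hc : s1.getD (i - 1) ' ' == s2.getD (j - 1) ' '
        · have h1 := ih (i - 1) (j - 1) memo (by omega) hg
          have hL : Lrec s1 s2 i j = (lcsM s1 s2 (i - 1) (j - 1) memo).1 + 1 := by
            rw [Lrec]; rw [dif_neg h0, if_pos hc, h1.1]
          rw [if_pos hc]
          exact ⟨hL.symm, goodM_insert s1 s2 _ h1.2 i j _ hL.symm⟩
        · have h1 := ih (i - 1) j memo (by omega) hg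
          have h2 := ih i (j - 1) (lcsM s1 s2 (i - 1) j memo).2 (by omega) h1.2
          have hL : Lrec s1 s2 i j
              = max (lcsM s1 s2 (i - 1) j memo).1
                  (lcsM s1 s2 i (j - 1) (lcsM s1 s2 (i - 1) j memo).2).1 := by
            rw [Lrec]; rw [dif_neg h0, if_neg hc, h1.1, h2.1]
          rw [if_neg hc]
          exact ⟨hL.symm, goodM_insert s1 s2 _ h2.2 i j _ hL.symm⟩

theorem goodM_empty (s1 s2 : List Char) : GoodM s1 s2 PySem.Dict.empty := by
  intro i j v hv
  simp [PySem.Dict.get?_empty] at hv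

theorem lcsB_eq_Lrec (s1 s2 : List Char) : lcsB s1 s2 = Lrec s1 s2 s1.length s2.length :=
  (lcsM_correct s1 s2 (s1.length + s2.length) s1.length s2.length PySem.Dict.empty
    (le_refl _) (goodM_empty s1 s2)).1

-- ----- A side: the bottom-up table computes Lrec -----
-- Proof plan: row i of A's matrix after the outer loop equals a rolling row `brow` (each new
-- row built by zipping the previous row with its shifted self and s2), and the entries of
-- `brow` satisfy the Lrec recurrence.

-- one new row, as a standalone recursion carrying the running previous value
def nrow (ch : Char) (p : Int) : List (Int × Int × Char) → List Int
  | [] => []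
  | t :: rest => (if ch == t.2.2 then t.1 + 1 else max t.2.1 p) :: nrow ch (if ch == t.2.2 then t.1 + 1 else max t.2.1 p) rest

-- the final value of the running previous value
def nlast (ch : Char) (p : Int) : List (Int × Int × Char) → Int
  | [] => p
  | t :: rest => nlast ch (if ch == t.2.2 then t.1 + 1 else max t.2.1 p) rest

theorem nrow_length (ch : Char) (p : Int) (l : List (Int × Int × Char)) :
    (nrow ch p l).length = l.length := by
  induction l generalizing p with
  | nil => rfl
  | cons t rest ih => simp [nrow, ih]

theorem nrow_snoc (ch : Char) (p : Int) (l : List (Int × Int × Char)) (t : Int × Int × Char) :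
    nrow ch p (l ++ [t]) =
      nrow ch p l ++ [if ch == t.2.2 then t.1 + 1 else max t.2.1 (nlast ch p l)] := by
  induction l generalizing p with
  | nil => rfl
  | cons a rest ih => simp [nrow, nlast, ih]

theorem nlast_snoc (ch : Char) (p : Int) (l : List (Int × Int × Char)) (t : Int × Int × Char) :
    nlast ch p (l ++ [t]) = if ch == t.2.2 then t.1 + 1 else max t.2.1 (nlast ch p l) := by
  induction l generalizing p with
  | nil => rfl
  | cons a rest ih => simp [nlast, ih]

theorem nrow_getD_last (ch : Char) (p d : Int) (l : List (Int × Int × Char)) :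
    (p :: nrow ch p l).getD l.length d = nlast ch p l := by
  induction l generalizing p with
  | nil => rfl
  | cons t rest ih => simpa [nrow, nlast] using ih (if ch == t.2.2 then t.1 + 1 else max t.2.1 p)

theorem nrow_take (ch : Char) (p : Int) (l : List (Int × Int × Char)) (k : Nat) :
    nrow ch p (l.take k) = (nrow ch p l).take k := by
  induction l generalizing p k with
  | nil => simp [nrow]
  | cons t rest ih =>
    cases k with
    | zero => simp [nrow]
    | succ k => simp [nrow, ih]

theorem nrow_getD_of_le (ch : Char) (p d : Int) (l : List (Int × Int × Char)) (k : Nat)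
    (hk : k ≤ l.length) :
    (p :: nrow ch p l).getD k d = nlast ch p (l.take k) := by
  have h := nrow_getD_last ch p d (l.take k)
  rw [List.length_take, min_eq_left hk, nrow_take] at h
  rw [← h]
  cases k with
  | zero => rfl
  | succ k =>
    simp only [List.getD_cons_succ]
    rw [List.getD_eq_getElem?_getD, List.getD_eq_getElem?_getD, List.getElem?_take,
      if_pos (Nat.lt_succ_self k)]

-- A's inner fold computing nrow (the running prev is st.2, the row built so far st.1)
theorem binner (ch : Char) (l : List (Int × Int × Char)) (acc : List Int) (p : Int) :
    (List.foldl
      (fun (st : List Int × Int) (t : Int × Int × Char) =>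
        (st.1 ++ [if ch == t.2.2 then t.1 + 1 else max t.2.1 st.2],
          if ch == t.2.2 then t.1 + 1 else max t.2.1 st.2))
      (acc, p) l).1 = acc ++ nrow ch p l := by
  induction l generalizing acc p with
  | nil => simp [nrow]
  | cons t rest ih => simp only [List.foldl_cons]; rw [ih]; simp [nrow]

-- A's cell update on the row being filled (ch = s1[i-1], t = s2, r = previous row, w = current row).
def vA (ch : Char) (t : List Char) (r w : List Int) (j : Nat) : Int :=
  if ch == t.getD (j - 1) ' ' then r.getD (j - 1) 0 + 1
  else max (w.getD (j - 1) 0) (r.getD j 0)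

-- Filling one row left to right equals the zip-built new row.
theorem rowfold_aux (ch : Char) (t : List Char) (r : List Int) (hr : r.length = t.length + 1) :
    ∀ (d k : Nat), k + d = t.length →
    List.foldl (fun w j => w.set j (vA ch t r w j))
      ((0 :: nrow ch 0 ((r.zip ((r.drop 1).zip t)).take k)) ++ List.replicate d 0)
      (List.range' (k + 1) d)
    = 0 :: nrow ch 0 (r.zip ((r.drop 1).zip t)) := by
  have hZ : (r.zip ((r.drop 1).zip t)).length = t.length := by
    simp [List.length_zip, hr]
  intro d
  induction d with
  | zero =>
    intro k hk
    rw [List.range'_zero, List.foldl_nil, List.replicate_zero, List.append_nil,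
      List.take_of_length_le (by omega)]
  | succ d ih =>
    intro k hk
    have hkt : k < t.length := by omega
    have hkr : k < r.length := by omega
    have hkr1 : k + 1 < r.length := by omega
    have hkZ : k < (r.zip ((r.drop 1).zip t)).length := by omega
    have hP : (0 :: nrow ch 0 ((r.zip ((r.drop 1).zip t)).take k)).length = k + 1 := by
      simp [nrow_length, List.length_take]
      omega
    rw [List.range'_succ, List.foldl_cons]
    have hgetk : ((0 :: nrow ch 0 ((r.zip ((r.drop 1).zip t)).take k)) ++ List.replicate (d + 1) (0 : Int)).getD k 0
        = nlast ch 0 ((r.zip ((r.drop 1).zip t)).take k) := by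
      rw [List.getD_append _ _ _ _ (by omega)]
      have := nrow_getD_last ch 0 0 ((r.zip ((r.drop 1).zip t)).take k)
      rwa [List.length_take, min_eq_left (by omega)] at this
    have hZk : (r.zip ((r.drop 1).zip t))[k]'hkZ = (r[k]'hkr, r[k + 1]'hkr1, t[k]'hkt) := by
      simp [List.getElem_zip]
    have hv : vA ch t r ((0 :: nrow ch 0 ((r.zip ((r.drop 1).zip t)).take k)) ++ List.replicate (d + 1) (0 : Int)) (k + 1)
        = if ch == t[k]'hkt then r[k]'hkr + 1
          else max (r[k + 1]'hkr1) (nlast ch 0 ((r.zip ((r.drop 1).zip t)).take k)) := by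
      unfold vA
      simp only [Nat.add_sub_cancel]
      rw [hgetk, List.getD_eq_getElem t ' ' hkt, List.getD_eq_getElem r 0 hkr,
        List.getD_eq_getElem r 0 hkr1, max_comm]
    have htake : (r.zip ((r.drop 1).zip t)).take (k + 1)
        = (r.zip ((r.drop 1).zip t)).take k ++ [(r[k]'hkr, r[k + 1]'hkr1, t[k]'hkt)] := by
      rw [List.take_add_one, List.getElem?_eq_getElem hkZ, hZk]
      rfl
    have hW : ((0 :: nrow ch 0 ((r.zip ((r.drop 1).zip t)).take k)) ++ List.replicate (d + 1) (0 : Int)).set (k + 1)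
        (vA ch t r ((0 :: nrow ch 0 ((r.zip ((r.drop 1).zip t)).take k)) ++ List.replicate (d + 1) (0 : Int)) (k + 1))
        = (0 :: nrow ch 0 ((r.zip ((r.drop 1).zip t)).take (k + 1))) ++ List.replicate d (0 : Int) := by
      rw [hv, List.set_append, if_neg (by omega), htake, nrow_snoc]
      have hlen : (nrow ch 0 (List.take k (r.zip ((List.drop 1 r).zip t)))).length = k := by
        rw [nrow_length, List.length_take]
        omega
      rw [List.drop_one] at hlen
      simp [List.replicate_succ, hlen]
    rw [hW]
    exact ih (k + 1) (by omega)

theorem rowfold (ch : Char) (t : List Char) (r : List Int) (hr : r.length = t.length + 1) :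
    List.foldl (fun w j => w.set j (vA ch t r w j))
      (List.replicate (t.length + 1) 0) (List.range' 1 t.length)
    = 0 :: nrow ch 0 (r.zip ((r.drop 1).zip t)) := by
  have h := rowfold_aux ch t r hr t.length 0 (by omega)
  simpa [nrow] using h

-- The matrix fold only rewrites row i; it equals setting row i to a row-level fold.
theorem mat_inner (ch : Char) (t : List Char) (i : Nat) (hi : 1 ≤ i) (l : List Nat) :
    ∀ (C : List (List Int)), i < C.length →
    List.foldl (fun C j => C.set i ((C.getD i []).set j (vA ch t (C.getD (i - 1) []) (C.getD i []) j))) C l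
    = C.set i (List.foldl (fun w j => w.set j (vA ch t (C.getD (i - 1) []) w j)) (C.getD i []) l) := by
  induction l with
  | nil =>
    intro C hC
    rw [List.foldl_nil, List.foldl_nil, List.getD_eq_getElem C [] hC, List.set_getElem_self]
  | cons j l ih =>
    intro C hC
    simp only [List.foldl_cons]
    rw [ih (C.set i ((C.getD i []).set j (vA ch t (C.getD (i - 1) []) (C.getD i []) j)))
      (by simpa using hC)]
    have h1 : ∀ X : List Int, (C.set i X).getD (i - 1) [] = C.getD (i - 1) [] := by
      intro X
      simp [List.getD, List.getElem?_set_ne (show i ≠ i - 1 by omega)]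
    have h2 : ∀ X : List Int, (C.set i X).getD i [] = X := by
      intro X
      simp [List.getD, List.getElem?_set_self (show i < C.length from hC)]
    rw [h1, h2, List.set_set]

-- the rolling row, as a function of the processed prefix of s1
def brow (t : List Char) (s : List Char) : List Int :=
  List.foldl (fun row ch =>
      (List.foldl
          (fun (st : List Int × Int) (tr : Int × Int × Char) =>
            let v : Int := if ch == tr.2.2 then tr.1 + 1 else max tr.2.1 st.2
            (st.1 ++ [v], v))
          ([0], 0) (row.zip ((PySem.List.slice row (some 1)).zip t))).1)
    (List.replicate (t.length + 1) (0 : Int)) s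

theorem brow_step (t : List Char) (row : List Int) (ch : Char) :
    (List.foldl
        (fun (st : List Int × Int) (tr : Int × Int × Char) =>
          let v : Int := if ch == tr.2.2 then tr.1 + 1 else max tr.2.1 st.2
          (st.1 ++ [v], v))
        ([0], 0) (row.zip ((PySem.List.slice row (some 1)).zip t))).1
    = 0 :: nrow ch 0 (row.zip ((row.drop 1).zip t)) := by
  rw [PySem.List.slice_from row (by norm_num)]
  simpa using binner ch (row.zip ((row.drop 1).zip t)) [0] 0

theorem brow_length (t s : List Char) : (brow t s).length = t.length + 1 := by
  unfold brow
  have aux : ∀ (s : List Char) (row : List Int), row.length = t.length + 1 →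
      (List.foldl (fun row ch =>
        (List.foldl
            (fun (st : List Int × Int) (tr : Int × Int × Char) =>
              let v : Int := if ch == tr.2.2 then tr.1 + 1 else max tr.2.1 st.2
              (st.1 ++ [v], v))
            ([0], 0) (row.zip ((PySem.List.slice row (some 1)).zip t))).1) row s).length
      = t.length + 1 := by
    intro s
    induction s with
    | nil => intro row h; simpa using h
    | cons ch s ih =>
      intro row h
      rw [List.foldl_cons, brow_step]
      apply ih
      simp [nrow_length, List.length_zip, h]
  exact aux s _ (by simp)

theorem brow_snoc (t s : List Char) (ch : Char) :
    brow t (s ++ [ch]) = 0 :: nrow ch 0 ((brow t s).zip (((brow t s).drop 1).zip t)) := by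
  unfold brow
  rw [List.foldl_append]
  exact brow_step t _ ch

-- The matrix after A's outer loop has processed rows 1..k.
def matA (s1 t : List Char) (k : Nat) : List (List Int) :=
  (List.range (k + 1)).map (fun j => brow t (s1.take j)) ++
    List.replicate (s1.length - k) (List.replicate (t.length + 1) (0 : Int))

theorem matA_step (s1 t : List Char) (i : Nat) (hi : 1 ≤ i) (him : i ≤ s1.length) :
    List.foldl (fun C j => C.set i ((C.getD i []).set j
        (vA (s1.getD (i - 1) ' ') t (C.getD (i - 1) []) (C.getD i []) j)))
      (matA s1 t (i - 1)) (List.range' 1 t.length)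
    = matA s1 t i := by
  have hi' : i - 1 < s1.length := by omega
  have hgetPrev : (matA s1 t (i - 1)).getD (i - 1) [] = brow t (s1.take (i - 1)) := by
    unfold matA
    rw [List.getD_append _ _ _ _ (by simp only [List.length_map, List.length_range]; omega),
      List.getD_eq_getElem _ _ (by simp only [List.length_map, List.length_range]; omega)]
    simp
  have hgetCur : (matA s1 t (i - 1)).getD i [] = List.replicate (t.length + 1) (0 : Int) := by
    unfold matA
    rw [List.getD_append_right _ _ _ _ (by simp only [List.length_map, List.length_range]; omega),
      List.getD_eq_getElem _ _ (by simp only [List.length_map, List.length_range, List.length_replicate]; omega)]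
    simp
  rw [mat_inner _ t i hi _ _ (by simp [matA]; omega)]
  rw [hgetPrev, hgetCur, rowfold _ t _ (brow_length t _), ← brow_snoc]
  have htake : s1.take (i - 1) ++ [s1.getD (i - 1) ' '] = s1.take i := by
    rw [List.getD_eq_getElem _ _ hi']
    conv_rhs => rw [show i = (i - 1) + 1 by omega]
    rw [List.take_add_one, List.getElem?_eq_getElem hi']
    rfl
  rw [htake]
  unfold matA
  rw [List.set_append, if_neg (by simp only [List.length_map, List.length_range]; omega)]
  simp only [List.length_map, List.length_range]
  rw [show i - (i - 1 + 1) = 0 by omega, show s1.length - (i - 1) = (s1.length - i) + 1 by omega,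
    List.replicate_succ, List.set_cons_zero, show i - 1 + 1 = i by omega, List.range_succ]
  simp

theorem matA_fold (s1 t : List Char) :
    ∀ (d k : Nat), k + d = s1.length →
    List.foldl (fun C i =>
        List.foldl (fun C j => C.set i ((C.getD i []).set j
            (vA (s1.getD (i - 1) ' ') t (C.getD (i - 1) []) (C.getD i []) j)))
          C (List.range' 1 t.length))
      (matA s1 t k) (List.range' (k + 1) d)
    = matA s1 t s1.length := by
  intro d
  induction d with
  | zero =>
    intro k hk
    obtain rfl : k = s1.length := by omega
    simp
  | succ d ih =>
    intro k hk
    rw [List.range'_succ, List.foldl_cons]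
    simp only [Nat.add_sub_cancel]
    have h := matA_step s1 t (k + 1) (by omega) (by omega)
    simp only [Nat.add_sub_cancel] at h
    rw [h]
    exact ih (k + 1) (by omega)

-- Lrec only looks at the first i characters of s1.
theorem Lrec_append (s t : List Char) (ch : Char) :
    ∀ (n i j : Nat), i + j ≤ n → i ≤ s.length →
      Lrec (s ++ [ch]) t i j = Lrec s t i j := by
  intro n
  induction n with
  | zero =>
    intro i j hn _
    obtain ⟨rfl, rfl⟩ : i = 0 ∧ j = 0 := by omega
    rw [Lrec_zero _ _ _ _ (Or.inl rfl), Lrec_zero _ _ _ _ (Or.inl rfl)]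
  | succ n ih =>
    intro i j hn hi
    by_cases h0 : i = 0 ∨ j = 0
    · rw [Lrec_zero _ _ _ _ h0, Lrec_zero _ _ _ _ h0]
    · have hij : ¬(i = 0) ∧ ¬(j = 0) := by
        constructor <;> intro hx <;> exact h0 (by omega)
      have hg : (s ++ [ch]).getD (i - 1) ' ' = s.getD (i - 1) ' ' := by
        rw [List.getD_append _ _ _ _ (by omega)]
      rw [Lrec_succ _ _ _ _ h0, Lrec_succ _ _ _ _ h0, hg]
      rw [ih (i - 1) (j - 1) (by omega) (by omega), ih (i - 1) j (by omega) (by omega),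
        ih i (j - 1) (by omega) hi]

-- entries of the rolling row satisfy the Lrec recurrence
theorem brow_entries (t : List Char) :
    ∀ (s : List Char) (j : Nat), j ≤ t.length →
      (brow t s).getD j 0 = Lrec s t s.length j := by
  intro s
  induction s using List.reverseRecOn with
  | nil =>
    intro j hj
    rw [show brow t [] = List.replicate (t.length + 1) (0 : Int) from rfl,
      List.length_nil, Lrec_zero _ _ _ _ (Or.inl rfl)]
    simp
  | append_singleton s ch ih =>
    intro j hj
    rw [brow_snoc]
    set r := brow t s with hr
    have hrl : r.length = t.length + 1 := brow_length t s
    have hZ : (r.zip ((r.drop 1).zip t)).length = t.length := by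
      simp [List.length_zip, hrl]
    -- inner induction on j
    clear hr
    induction j with
    | zero =>
      rw [List.length_append, List.length_singleton,
        List.getD_cons_zero, Lrec_zero _ _ _ _ (Or.inr rfl)]
    | succ j ihj =>
      rw [List.length_append, List.length_singleton]
      have hj' : j ≤ t.length := by omega
      have hjt : j < t.length := by omega
      have hjr : j < r.length := by omega
      have hjr1 : j + 1 < r.length := by omega
      have hjZ : j < (r.zip ((r.drop 1).zip t)).length := by omega
      have hZj : (r.zip ((r.drop 1).zip t))[j]'hjZ = (r[j]'hjr, r[j + 1]'hjr1, t[j]'hjt) := by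
        simp [List.getElem_zip]
      have htake : (r.zip ((r.drop 1).zip t)).take (j + 1)
          = (r.zip ((r.drop 1).zip t)).take j ++ [(r[j]'hjr, r[j + 1]'hjr1, t[j]'hjt)] := by
        rw [List.take_add_one, List.getElem?_eq_getElem hjZ, hZj]
        rfl
      rw [nrow_getD_of_le _ _ _ _ _ (by omega), htake, nlast_snoc]
      have hprev : nlast ch 0 ((r.zip ((r.drop 1).zip t)).take j)
          = Lrec (s ++ [ch]) t (s.length + 1) j := by
        rw [← nrow_getD_of_le ch 0 0 _ j (by omega)]
        have := ihj hj'
        rw [List.length_append, List.length_singleton] at this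
        exact this
      rw [hprev]
      have hLr : ∀ k, k ≤ t.length → r.getD k 0 = Lrec s t s.length k := ih
      have hne : ¬(s.length + 1 = 0 ∨ j + 1 = 0) := by omega
      rw [Lrec_succ _ _ _ _ hne]
      simp only [Nat.add_sub_cancel]
      have hgs : (s ++ [ch]).getD s.length ' ' = ch := by
        rw [List.getD_append_right _ _ _ _ (le_refl _)]
        simp
      rw [hgs]
      have hgt : t.getD j ' ' = t[j]'hjt := List.getD_eq_getElem t ' ' hjt
      rw [hgt]
      by_cases hc : ch == t[j]'hjt
      · rw [if_pos hc, if_pos hc,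
          Lrec_append s t ch (s.length + j) s.length j (by omega) (le_refl _),
          ← hLr j hj', List.getD_eq_getElem r 0 hjr]
      · rw [if_neg hc, if_neg hc,
          Lrec_append s t ch (s.length + (j + 1)) s.length (j + 1) (by omega) (le_refl _),
          ← hLr (j + 1) (by omega), List.getD_eq_getElem r 0 hjr1, max_comm]

theorem lcsA_eq_lcsB (s1 s2 : List Char) : lcsA s1 s2 = lcsB s1 s2 := by
  have hfold := matA_fold s1 s2 s1.length 0 (by omega)
  simp only [vA] at hfold
  have hC0 : matA s1 s2 0 = List.replicate (s1.length + 1) (List.replicate (s2.length + 1) (0 : Int)) := by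
    simp [matA, brow, List.replicate_succ]
  rw [hC0] at hfold
  have hlast : (matA s1 s2 s1.length).getD s1.length [] = brow s2 s1 := by
    unfold matA
    rw [Nat.sub_self, List.replicate_zero, List.append_nil,
      List.getD_eq_getElem _ _ (by simp)]
    simp [List.take_length]
  rw [lcsB_eq_Lrec]
  simp only [lcsA]
  simp only [Nat.zero_add] at hfold
  rw [hfold, hlast]
  exact brow_entries s2 s1 s2.length (le_refl _)

-- ----- outer loop: A's running (cand, ref, lcs) accumulator vs B's min-with-key -----

theorem minfold (L : List (String × String)) :
    ∀ (c r : String),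
    List.foldl (fun (st : String × String × Int) (p : String × String) =>
        if PySem.Str.len p.2 - 2 * lcsB p.1.toList p.2.toList < PySem.Str.len st.2.1 - 2 * st.2.2
        then (p.1, p.2, lcsB p.1.toList p.2.toList) else st)
      (c, r, lcsB c.toList r.toList) L
    = (fun q : String × String => (q.1, q.2, lcsB q.1.toList q.2.toList))
        (List.foldl (fun (m : String × String) p =>
          if (PySem.Str.len p.2 - 2 * lcsB p.1.toList p.2.toList) <
             (PySem.Str.len m.2 - 2 * lcsB m.1.toList m.2.toList) then p else m) (c, r) L) := by
  induction L with
  | nil => simp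
  | cons p L ih =>
    intro c r
    simp only [List.foldl_cons]
    by_cases h : (PySem.Str.len p.2 - 2 * lcsB p.1.toList p.2.toList) <
        (PySem.Str.len (c, r).2 - 2 * lcsB (c, r).1.toList (c, r).2.toList)
    · simp only [if_pos h]; exact ih p.1 p.2
    · simp only [if_neg h]; exact ih c r

theorem min?_cons_foldl {α : Type} (key : α → Int) (s : α) (L : List α) :
    PySem.List.min? (s :: L) key
    = some (List.foldl (fun m p => if key p < key m then p else m) s L) := by
  have aux : ∀ (L : List α) (s : α),
      List.foldl (fun acc x => match acc with
        | none => some x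
        | some m => if key x < key m then some x else some m) (some s) L
      = some (List.foldl (fun m p => if key p < key m then p else m) s L) := by
    intro L
    induction L with
    | nil => intro s; rfl
    | cons p L ih =>
      intro s
      simp only [List.foldl_cons]
      by_cases h : key p < key s
      · simp only [if_pos h]; exact ih p
      · simp only [if_neg h]; exact ih s
  simp only [PySem.List.min?, List.foldl_cons]
  exact aux L s

theorem nestedA (ps ts : List String) (init : String × String × Int) :
    List.foldl (fun st cand =>
      List.foldl (fun st ref =>
        if PySem.Str.len ref - 2 * lcsB cand.toList ref.toList < PySem.Str.len st.2.1 - 2 * st.2.2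
        then (cand, ref, lcsB cand.toList ref.toList) else st) st ts) init ps
    = List.foldl (fun st (p : String × String) =>
        if PySem.Str.len p.2 - 2 * lcsB p.1.toList p.2.toList < PySem.Str.len st.2.1 - 2 * st.2.2
        then (p.1, p.2, lcsB p.1.toList p.2.toList) else st)
      init (ps.flatMap fun c => ts.map (fun r => (c, r))) := by
  rw [List.foldl_flatMap]
  congr 1
  funext acc c
  rw [List.foldl_map]

theorem slice_one_cons {α : Type} (x : α) (xs : List α) :
    PySem.List.slice (x :: xs) (some 1) = xs := by
  rw [PySem.List.slice_from _ (by norm_num)]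
  rfl

-- ===== VERDICT (by name: the statement is the Claim_ definition above) =====
theorem find_best_reference_spec : Claim_equal_find_best_reference := by
  intro pred truth _ pre
  obtain ⟨hp, ht⟩ := pre
  cases pred with
  | nil => exact absurd rfl hp
  | cons p0 ps =>
  cases truth with
  | nil => exact absurd rfl ht
  | cons t0 ts =>
  unfold Spec_find_best_reference find_best_reference find_best_reference_alt
  rw [slice_one_cons, slice_one_cons]
  have hget0p : PySem.List.pyGetD (p0 :: ps) 0 "" = p0 := by
    rw [PySem.List.pyGetD_ofNat']
    rfl
  have hget0t : PySem.List.pyGetD (t0 :: ts) 0 "" = t0 := by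
    rw [PySem.List.pyGetD_ofNat']
    rfl
  rw [hget0p, hget0t]
  simp only [lcsA_eq_lcsB]
  rw [nestedA, minfold, min?_cons_foldl (fun p : String × String =>
    PySem.Str.len p.2 - 2 * lcsB p.1.toList p.2.toList) (p0, t0)
    (ps.flatMap fun c => ts.map (fun r => (c, r)))]
  rfl
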